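-- pv_equiv track=rewrite | github.com/baidu/QCompute | Example/Level_3/4_ShorAlgorithm/ShorAlgorithmLocal.py | func_from_fraction_continued
-- ===== SOURCE A (Python) =====
-- def func_from_fraction_continued(list_int_generator):
--     """
--     a int list such as [0,1,2,3] -> the denominator 7 of 0+1/(1+1/(2+1/3)))=10/7
--     :param list_int_generator: a int list such as [0,1,2,3]
--     :return: the denominator of the fraction generated by the list
--     even though the func returns the variable int_numerator
--     """
--     int_denominator = 1
--     int_numerator = 0
--     while len(list_int_generator) != 0:  # We use a stack data structure to compute the denominator of continued
--         # fraction, and the fraction is stored as two int: the denominator and the numerator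
--         int_denominator_new = list_int_generator.pop() * int_denominator + int_numerator
--         int_numerator = int_denominator
--         int_denominator = int_denominator_new
--         # The above swapping step implicate computing the inverse of a fraction
--     return int_numerator  # We return the denominator even though the func returns a variable called int_numerator
-- ===== SOURCE B (Python) =====
-- def func_from_fraction_continued(list_int_generator):
--     # Forward convergent recurrence h_n = a_n*h_{n-1} + h_{n-2}, k_n = a_n*k_{n-1} + k_{n-2};
--     # consumes the list front-to-back (and empties it, matching A's side effect); returns the
--     # final denominator convergent k.
--     h_prev2, h_prev1 = 0, 1
--     k_prev2, k_prev1 = 1, 0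
--     while list_int_generator:
--         a = list_int_generator.pop(0)
--         h_prev2, h_prev1 = h_prev1, a * h_prev1 + h_prev2
--         k_prev2, k_prev1 = k_prev1, a * k_prev1 + k_prev2
--     return k_prev1
-- ===== Notes on version B (the rewrite author's own statement) =====
-- stated objective: alternative
-- what changed: Replaces A's back-to-front stack evaluation of the continued fraction (pop from the end, swapping a single denominator/numerator pair) by the standard forward convergent recurrence consumed front-to-back, maintaining both numerator and denominator convergent pairs and returning the final denominator; equality rests on the continuant reversal (matrix-transpose) identity.
import Mathlib
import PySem

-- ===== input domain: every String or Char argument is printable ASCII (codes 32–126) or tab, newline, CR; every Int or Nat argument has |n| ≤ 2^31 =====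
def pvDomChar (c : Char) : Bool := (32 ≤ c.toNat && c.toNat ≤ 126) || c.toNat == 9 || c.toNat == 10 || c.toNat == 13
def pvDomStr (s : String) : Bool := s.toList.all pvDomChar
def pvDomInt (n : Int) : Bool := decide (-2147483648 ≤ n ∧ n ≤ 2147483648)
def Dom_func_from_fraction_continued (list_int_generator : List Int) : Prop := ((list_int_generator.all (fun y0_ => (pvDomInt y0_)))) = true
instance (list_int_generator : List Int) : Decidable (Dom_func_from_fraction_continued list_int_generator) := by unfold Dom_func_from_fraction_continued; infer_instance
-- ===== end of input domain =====

-- B evaluates the continued fraction by the forward convergent recurrence (front-to-back)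
-- instead of A's back-to-front stack evaluation; equal return value proved for all inputs.
-- Both Pythons empty the argument list in place (A pops from the end, B from the front);
-- the equivalence here is about the return value only.

-- ===== PORT A =====
-- A's while loop: pop from the END of the list, update (denominator, numerator).
def pvAloop (l : List Int) (d n : Int) : Int :=
  if h : l = [] then n
  else pvAloop l.dropLast (l.getLast h * d + n) d
termination_by l.length
decreasing_by
  have : l.length ≠ 0 := fun h0 => h (List.eq_nil_of_length_eq_zero h0)
  simp [List.length_dropLast]; omega

def func_from_fraction_continued (list_int_generator : List Int) : Int :=
  pvAloop list_int_generator 1 0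

-- ===== PORT B =====
-- B's while loop: pop from the FRONT, maintain both convergent pairs (h, k), return final k.
def pvBloop (l : List Int) (h2 h1 k2 k1 : Int) : Int :=
  match l with
  | [] => k1
  | a :: t => pvBloop t h1 (a * h1 + h2) k1 (a * k1 + k2)

def func_from_fraction_continued_alt (list_int_generator : List Int) : Int :=
  pvBloop list_int_generator 0 1 1 0

-- ===== PRECONDITION & SPEC =====
def Spec_func_from_fraction_continued (list_int_generator : List Int) (out : Int) : Prop := out = func_from_fraction_continued_alt list_int_generator
instance (list_int_generator : List Int) (out : Int) : Decidable (Spec_func_from_fraction_continued list_int_generator out) := by unfold Spec_func_from_fraction_continued; infer_instance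

-- ===== CLAIM (what is proved, stated in full; the proofs are below) =====
def Claim_equal_func_from_fraction_continued : Prop := ∀ (list_int_generator : List Int), Dom_func_from_fraction_continued list_int_generator → Spec_func_from_fraction_continued list_int_generator (func_from_fraction_continued list_int_generator)

-- ===== LEMMAS AND PROOFS =====

-- The common abstract step: consume from the front, state = (k_{n-2}, k_{n-1}).
def pvFwd : List Int → Int × Int → Int × Int
  | [], s => s
  | a :: t, (p, q) => pvFwd t (q, a * q + p)

theorem pvFwd_append (l : List Int) (a : Int) (p q : Int) :
    pvFwd (l ++ [a]) (p, q) = pvFwd [a] (pvFwd l (p, q)) := by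
  induction l generalizing p q with
  | nil => rfl
  | cons b t ih => simpa [pvFwd] using ih q (b * q + p)

-- linearity of pvFwd in the initial state
theorem pvFwd_lin (l : List Int) (p q : Int) :
    pvFwd l (p, q) =
      (p * (pvFwd l (1, 0)).1 + q * (pvFwd l (0, 1)).1,
       p * (pvFwd l (1, 0)).2 + q * (pvFwd l (0, 1)).2) := by
  induction l generalizing p q with
  | nil => simp [pvFwd]
  | cons a t ih =>
    have h1 : pvFwd (a :: t) (1, 0) = pvFwd t (0, 1) := by norm_num [pvFwd]
    have h2 : pvFwd (a :: t) (0, 1) = pvFwd t (1, a) := by norm_num [pvFwd]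
    show pvFwd t (q, a * q + p) = _
    rw [h1, h2, ih q (a * q + p), ih 1 a]
    simp only [Prod.mk.injEq]
    exact ⟨by ring, by ring⟩

-- continuant reversal: running pvFwd over the reversed list transposes the coefficient matrix
theorem pvFwd_reverse (l : List Int) :
    pvFwd l.reverse (1, 0) = ((pvFwd l (1, 0)).1, (pvFwd l (0, 1)).1) ∧
    pvFwd l.reverse (0, 1) = ((pvFwd l (1, 0)).2, (pvFwd l (0, 1)).2) := by
  induction l with
  | nil => simp [pvFwd]
  | cons a t ih =>
    have hrev : (a :: t).reverse = t.reverse ++ [a] := by simp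
    have h1 : pvFwd (a :: t) (1, 0) = pvFwd t (0, 1) := by norm_num [pvFwd]
    have h2 : pvFwd (a :: t) (0, 1) = pvFwd t (1, a) := by norm_num [pvFwd]
    have hta := pvFwd_lin t 1 a
    constructor
    · rw [hrev, pvFwd_append, ih.1, h1, h2, hta]
      simp only [pvFwd, Prod.mk.injEq]
      exact ⟨trivial, by ring⟩
    · rw [hrev, pvFwd_append, ih.2, h1, h2, hta]
      simp only [pvFwd, Prod.mk.injEq]
      exact ⟨trivial, by ring⟩

-- A's loop is pvFwd over the reversed list with swapped state, returning the first component
theorem pvAloop_eq (l : List Int) (d n : Int) :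
    pvAloop l d n = (pvFwd l.reverse (n, d)).1 := by
  induction l using List.reverseRecOn generalizing d n with
  | nil => simp [pvAloop, pvFwd]
  | append_singleton t a ih =>
    have hne : t ++ [a] ≠ [] := by simp
    have h1 : pvAloop (t ++ [a]) d n = pvAloop t (a * d + n) d := by
      rw [pvAloop]; simp [hne]
    rw [h1, ih]
    simp [pvFwd]

-- B's loop ignores the h pair and is pvFwd on the k pair
theorem pvBloop_eq (l : List Int) (h2 h1 k2 k1 : Int) :
    pvBloop l h2 h1 k2 k1 = (pvFwd l (k2, k1)).2 := by
  induction l generalizing h2 h1 k2 k1 with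
  | nil => rfl
  | cons a t ih => simp [pvBloop, pvFwd, ih]

-- ===== VERDICT (by name: the statement is the Claim_ definition above) =====
theorem func_from_fraction_continued_spec : Claim_equal_func_from_fraction_continued := by
  intro l _
  show func_from_fraction_continued l = func_from_fraction_continued_alt l
  rw [func_from_fraction_continued, func_from_fraction_continued_alt,
      pvAloop_eq, pvBloop_eq, (pvFwd_reverse l).2]
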